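-- pv_equiv track=rewrite | github.com/KristofferSchnieders/Smolyak_qmc | Methodes/Smolyak_three.py | find_next_tuples_index
-- ===== SOURCE A (Python) =====
-- import collections
--
-- def find_next_tuples_index(current_tuple, tuple_list):
--     """
--     Determine index of the matrix with the most reusable information
--
--     Function to find the function evaluation matrix with the most reusable function values
--
--     Args:
--         current_tuple (tuple): Tuple saving the degree of approximation currently used for the approximation
--         tuple_list (list): list of tuples for which the evaluations are stored.
--
--     Returns:
--         integer: The index of the evaluations with the most reusable evaluations.
--     """
--
--     dim = len(current_tuple)
--     diff = [[current_tuple[k_1] - k_2[k_1] for k_1 in range(dim)] for k_2 in tuple_list]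
--     direct_smaller = [1 if (collections.Counter(k_1)[0] == dim - 1 and collections.Counter(k_1)[1] == 1) else 0 for k_1
--                       in diff]
--     if collections.Counter(direct_smaller)[1] == 0:
--         neighbour = [1 if (collections.Counter(k_1)[0] == dim - 2 and collections.Counter(k_1)[1] == 1 and
--                            collections.Counter(k_1)[-1] == 1) else 0 for k_1 in diff]
--         index_evals = neighbour.index(1)
--         if isinstance(index_evals, list):
--             index_evals = index_evals[0]
--     else:
--         index_evals = direct_smaller.index(1)
--         if isinstance(index_evals, list):
--             index_evals = index_evals[0]
--     return index_evals
-- ===== SOURCE B (Python) =====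
-- def find_next_tuples_index(current_tuple, tuple_list):
--     """Inverted strategy: instead of scanning and classifying every stored tuple,
--     index the stored tuples by their dim-prefix (first occurrence wins), then
--     generate the dim direct predecessors and the dim*(dim-1) swap-neighbours of
--     current_tuple and look them up; the answer is the minimum stored index found."""
--     dim = len(current_tuple)
--     first_idx = {}
--     for i, cand in enumerate(tuple_list):
--         key = tuple(cand[:dim])
--         if key not in first_idx:
--             first_idx[key] = i
--     ct = list(current_tuple)
--     direct_hits = []
--     for d in range(dim):
--         ct[d] -= 1
--         j = first_idx.get(tuple(ct))
--         if j is not None: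
--             direct_hits.append(j)
--         ct[d] += 1
--     if direct_hits:
--         return min(direct_hits)
--     neigh_hits = []
--     for d in range(dim):
--         for e in range(dim):
--             if d != e:
--                 ct[d] -= 1
--                 ct[e] += 1
--                 j = first_idx.get(tuple(ct))
--                 if j is not None:
--                     neigh_hits.append(j)
--                 ct[d] += 1
--                 ct[e] -= 1
--     if neigh_hits:
--         return min(neigh_hits)
--     raise ValueError("1 is not in list")
-- ===== Notes on version B (the rewrite author's own statement) =====
-- stated objective: alternative
-- what changed: Inverts the search: instead of scanning tuple_list and classifying each candidate's difference vector with Counters, B builds a hash index from dim-prefix to first occurrence index and then generates the dim direct predecessors and dim*(dim-1) swap-neighbours of current_tuple, looking each up and returning the minimum index found.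
import Mathlib
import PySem

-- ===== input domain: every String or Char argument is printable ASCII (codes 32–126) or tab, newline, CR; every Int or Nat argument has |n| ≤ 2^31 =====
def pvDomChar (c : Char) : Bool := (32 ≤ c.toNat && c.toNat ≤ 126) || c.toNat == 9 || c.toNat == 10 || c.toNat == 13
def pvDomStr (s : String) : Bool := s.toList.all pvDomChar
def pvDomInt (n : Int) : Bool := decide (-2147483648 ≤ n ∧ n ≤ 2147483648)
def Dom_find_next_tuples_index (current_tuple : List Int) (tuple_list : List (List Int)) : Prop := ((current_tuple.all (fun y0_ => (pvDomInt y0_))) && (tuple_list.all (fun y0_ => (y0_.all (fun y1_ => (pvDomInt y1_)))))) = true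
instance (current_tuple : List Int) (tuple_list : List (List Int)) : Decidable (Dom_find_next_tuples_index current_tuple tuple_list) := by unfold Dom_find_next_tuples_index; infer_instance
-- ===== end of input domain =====

-- B inverts the search: instead of classifying every stored tuple's difference vector with
-- Counters, it hash-indexes the stored tuples by dim-prefix and looks up the generated
-- direct-predecessor / swap-neighbour tuples of current_tuple (objective: alternative).

-- ===== PORT A =====
def find_next_tuples_index (current_tuple : List Int) (tuple_list : List (List Int)) : Int :=
  let dim : Int := current_tuple.length
  let diff : List (List Int) := tuple_list.map (fun k_2 =>
    (PySem.List.pyRange 0 dim 1).map (fun k_1 =>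
      PySem.List.pyGetD current_tuple k_1 0 - PySem.List.pyGetD k_2 k_1 0))
  let direct_smaller : List Int := diff.map (fun k_1 =>
    if (k_1.count 0 : Int) = dim - 1 ∧ (k_1.count 1 : Int) = 1 then 1 else 0)
  if (direct_smaller.count 1 : Int) = 0 then
    let neighbour : List Int := diff.map (fun k_1 =>
      if (k_1.count 0 : Int) = dim - 2 ∧ (k_1.count 1 : Int) = 1 ∧ (k_1.count (-1) : Int) = 1 then 1 else 0)
    -- neighbour.index(1); Python raises ValueError when 1 is absent (excluded by Pre_)
    (((PySem.List.index? neighbour 1).getD 0 : Nat) : Int)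
  else
    (((PySem.List.index? direct_smaller 1).getD 0 : Nat) : Int)

-- ===== PORT B =====
-- key of a stored tuple: tuple(cand[:dim])
def fnti_key (dim : Nat) (cand : List Int) : List Int :=
  PySem.List.slice cand none (some (dim : Int))

-- 'for i, cand in enumerate(tuple_list): if key not in first_idx: first_idx[key] = i'
def fnti_build (dim : Nat) (l : List (List Int)) (i : Int)
    (dct : PySem.Dict (List Int) Int) : PySem.Dict (List Int) Int :=
  match l with
  | [] => dct
  | cand :: rest =>
    fnti_build dim rest (i + 1)
      (if dct.contains (fnti_key dim cand) then dct else dct.insert (fnti_key dim cand) i)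

-- tuple(ct) after 'ct[d] -= 1' (the Source B loop restores ct afterwards)
def fnti_dkey (ct : List Int) (d : Nat) : List Int := ct.set d (ct.getD d 0 - 1)
-- tuple(ct) after 'ct[d] -= 1; ct[e] += 1' with d ≠ e
def fnti_nkey (ct : List Int) (d e : Nat) : List Int :=
  (ct.set d (ct.getD d 0 - 1)).set e (ct.getD e 0 + 1)

def find_next_tuples_index_alt (current_tuple : List Int) (tuple_list : List (List Int)) : Int :=
  let dim := current_tuple.length      -- range(dim) with dim = len(current_tuple) ≥ 0; exact
  let first_idx := fnti_build dim tuple_list 0 PySem.Dict.empty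
  let direct_hits := (List.range dim).filterMap (fun d => first_idx.get? (fnti_dkey current_tuple d))
  if direct_hits ≠ [] then (PySem.List.min? direct_hits (fun x => x)).getD 0
  else
    let neigh_hits := (List.range dim).flatMap (fun d =>
      (List.range dim).filterMap (fun e =>
        if d ≠ e then first_idx.get? (fnti_nkey current_tuple d e) else none))
    if neigh_hits ≠ [] then (PySem.List.min? neigh_hits (fun x => x)).getD 0
    else 0  -- Source B raises ValueError here (excluded by Pre_)

-- ===== PRECONDITION & SPEC =====
-- row of coordinate differences current_tuple[k] - t[k], used to classify a candidate
def pvDiffRow (ct t : List Int) : List Int :=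
  (List.range ct.length).map (fun k => ct.getD k 0 - t.getD k 0)
def pvDirect (ct t : List Int) : Bool :=
  ((pvDiffRow ct t).count 0 : Int) == (ct.length : Int) - 1 && ((pvDiffRow ct t).count 1 : Int) == 1
def pvNeigh (ct t : List Int) : Bool :=
  ((pvDiffRow ct t).count 0 : Int) == (ct.length : Int) - 2 && ((pvDiffRow ct t).count 1 : Int) == 1
    && ((pvDiffRow ct t).count (-1) : Int) == 1
-- Pre_ = exactly the inputs on which Python A returns: every stored tuple is at least as long as
-- current_tuple (otherwise k_2[k_1] raises IndexError) and some stored tuple is a direct or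
-- neighbour match (otherwise neighbour.index(1) raises ValueError).
def Pre_find_next_tuples_index (current_tuple : List Int) (tuple_list : List (List Int)) : Prop :=
  (∀ t ∈ tuple_list, current_tuple.length ≤ t.length) ∧
  (∃ t ∈ tuple_list, pvDirect current_tuple t = true ∨ pvNeigh current_tuple t = true)
instance (current_tuple : List Int) (tuple_list : List (List Int)) : Decidable (Pre_find_next_tuples_index current_tuple tuple_list) := by unfold Pre_find_next_tuples_index; infer_instance

def pvWitness_find_next_tuples_index : List Int × List (List Int) := ([2, 1], [[2, 2], [1, 1]])

def Spec_find_next_tuples_index (current_tuple : List Int) (tuple_list : List (List Int)) (out : Int) : Prop := out = find_next_tuples_index_alt current_tuple tuple_list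
instance (current_tuple : List Int) (tuple_list : List (List Int)) (out : Int) : Decidable (Spec_find_next_tuples_index current_tuple tuple_list out) := by unfold Spec_find_next_tuples_index; infer_instance

-- ===== CLAIM (what is proved, stated in full; the proofs are below) =====
def Claim_equal_find_next_tuples_index : Prop := ∀ (current_tuple : List Int) (tuple_list : List (List Int)), Dom_find_next_tuples_index current_tuple tuple_list → Pre_find_next_tuples_index current_tuple tuple_list → Spec_find_next_tuples_index current_tuple tuple_list (find_next_tuples_index current_tuple tuple_list)

-- ===== LEMMAS AND PROOFS =====

-- ---------- A-side characterisation ----------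

-- the row of differences A builds for one candidate is pvDiffRow
theorem diff_row_eq (ct t : List Int) :
    (PySem.List.pyRange 0 (ct.length : Int) 1).map (fun k_1 =>
      PySem.List.pyGetD ct k_1 0 - PySem.List.pyGetD t k_1 0) = pvDiffRow ct t := by
  simp [PySem.List.pyRange_one, pvDiffRow, List.map_map, Function.comp]

theorem count_one_map_ite (p : List Int → Bool) (l : List (List Int)) :
    ((l.map (fun t => if p t = true then (1 : Int) else 0)).count 1) = l.countP p := by
  induction l with
  | nil => rfl
  | cons a l ih => by_cases h : p a = true <;> simp [h, ih]

theorem index?_map_ite (p : List Int → Bool) (l : List (List Int)) :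
    PySem.List.index? (l.map (fun t => if p t = true then (1 : Int) else 0)) 1 = l.findIdx? p := by
  induction l with
  | nil => rfl
  | cons a l ih =>
    by_cases h : p a = true
    · have h' : (if p a = true then (1 : Int) else 0) = 1 := by simp [h]
      rw [List.map_cons, h', PySem.List.index?_cons_self]
      simp [List.findIdx?_cons, h]
    · have h' : (if p a = true then (1 : Int) else 0) = 0 := by simp [h]
      rw [List.map_cons, h', PySem.List.index?_cons_of_ne _ (by decide), ih]
      simp [List.findIdx?_cons, h]

-- characterisation of A: first direct index, else first neighbour index, else 0
theorem a_char (ct : List Int) (tl : List (List Int)) :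
    find_next_tuples_index ct tl =
      match tl.findIdx? (pvDirect ct) with
      | some j => (j : Int)
      | none => (match tl.findIdx? (pvNeigh ct) with
                 | some j => (j : Int)
                 | none => 0) := by
  rw [find_next_tuples_index]
  simp only
  have hdiff : tl.map (fun k_2 => (PySem.List.pyRange 0 (ct.length : Int) 1).map (fun k_1 =>
      PySem.List.pyGetD ct k_1 0 - PySem.List.pyGetD k_2 k_1 0)) = tl.map (fun t => pvDiffRow ct t) :=
    List.map_congr_left (fun t _ => diff_row_eq ct t)
  rw [hdiff, List.map_map, List.map_map]
  have hds : tl.map ((fun k_1 : List Int =>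
      if (k_1.count 0 : Int) = (ct.length : Int) - 1 ∧ (k_1.count 1 : Int) = 1 then (1:Int) else 0) ∘ (fun t => pvDiffRow ct t)) =
      tl.map (fun t => if pvDirect ct t = true then (1:Int) else 0) :=
    List.map_congr_left (fun t _ => by
      have hiff : (((pvDiffRow ct t).count 0 : Int) = (ct.length : Int) - 1 ∧ ((pvDiffRow ct t).count 1 : Int) = 1) ↔ pvDirect ct t = true := by
        simp [pvDirect]
      simp only [Function.comp, hiff])
  have hns : tl.map ((fun k_1 : List Int =>
      if (k_1.count 0 : Int) = (ct.length : Int) - 2 ∧ (k_1.count 1 : Int) = 1 ∧ (k_1.count (-1) : Int) = 1 then (1:Int) else 0) ∘ (fun t => pvDiffRow ct t)) =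
      tl.map (fun t => if pvNeigh ct t = true then (1:Int) else 0) :=
    List.map_congr_left (fun t _ => by
      have hiff : (((pvDiffRow ct t).count 0 : Int) = (ct.length : Int) - 2 ∧ ((pvDiffRow ct t).count 1 : Int) = 1 ∧ ((pvDiffRow ct t).count (-1) : Int) = 1) ↔ pvNeigh ct t = true := by
        simp [pvNeigh, and_assoc]
      simp only [Function.comp, hiff])
  rw [hds, hns, count_one_map_ite, index?_map_ite, index?_map_ite]
  by_cases hz : tl.countP (pvDirect ct) = 0
  · have hfd : tl.findIdx? (pvDirect ct) = none :=
      List.findIdx?_eq_none_iff.mpr (by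
        intro x hx
        have := List.countP_eq_zero.mp hz x hx
        simpa using this)
    rw [if_pos (by exact_mod_cast hz)]
    simp only [hfd]
    cases hfn : tl.findIdx? (pvNeigh ct) <;> simp
  · rw [if_neg (by exact_mod_cast hz)]
    have hex : ∃ x ∈ tl, pvDirect ct x = true := by
      by_contra hc; push Not at hc
      exact hz (List.countP_eq_zero.mpr (by intro a ha; simpa using hc a ha))
    have hsome : (tl.findIdx? (pvDirect ct)).isSome := by
      rw [List.findIdx?_isSome]
      obtain ⟨x, hx, hpx⟩ := hex
      exact List.any_eq_true.mpr ⟨x, hx, hpx⟩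
    obtain ⟨j, hj⟩ := Option.isSome_iff_exists.mp hsome
    simp only [hj]
    simp

-- ---------- combinatorics: counts of a difference row determine its shape ----------

theorem zipWith_sub_self (l : List Int) :
    List.zipWith (fun a b => a - b) l l = List.replicate l.length 0 := by
  induction l with
  | nil => rfl
  | cons a l ih => simp [List.replicate_succ]

theorem count3_le (x y z : Int) (hxy : x ≠ y) (hxz : x ≠ z) (hyz : y ≠ z) (l : List Int) :
    l.count x + l.count y + l.count z ≤ l.length := by
  induction l with
  | nil => simp
  | cons a l ih =>
    simp only [List.count_cons, List.length_cons, beq_iff_eq]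
    split_ifs <;> omega

theorem fnti_Z (ct : List Int) : ∀ u : List Int, u.length = ct.length →
    (((List.zipWith (fun a b => a - b) ct u).count 0 = ct.length) ↔ ct = u) := by
  induction ct with
  | nil => intro u hu; simp at hu; subst hu; simp
  | cons a ct' ih =>
    intro u hu
    cases u with
    | nil => simp at hu
    | cons b u' =>
      have hn : u'.length = ct'.length := by simpa using hu
      have hle : (List.zipWith (fun a b : Int => a - b) ct' u').count 0 ≤ ct'.length := by
        calc _ ≤ (List.zipWith (fun a b : Int => a - b) ct' u').length := List.count_le_length
        _ = ct'.length := by simp [List.length_zipWith]; omega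
      by_cases hab : a - b = 0
      · have hba : a = b := by omega
        simp only [List.zipWith_cons_cons, List.count_cons, List.length_cons, beq_iff_eq,
          if_pos hab, List.cons.injEq]
        constructor
        · intro h; exact ⟨hba, (ih u' hn).mp (by omega)⟩
        · rintro ⟨_, h2⟩; have := (ih u' hn).mpr h2; omega
      · simp only [List.zipWith_cons_cons, List.count_cons, List.length_cons, beq_iff_eq,
          if_neg hab, List.cons.injEq]
        constructor
        · intro h; omega
        · rintro ⟨h1, _⟩; omega

theorem pvDiffRow_eq_zipWith (ct t : List Int) (h : ct.length ≤ t.length) :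
    pvDiffRow ct t
      = List.zipWith (fun a b => a - b) ct (t.take ct.length) := by
  unfold pvDiffRow
  apply List.ext_getElem
  · simp [List.length_zipWith]; omega
  · intro i h1 h2
    simp only [List.getElem_map, List.getElem_range, List.getElem_zipWith, List.getElem_take]
    have hi : i < ct.length := by simpa using h1
    rw [List.getD_eq_getElem ct 0 hi, List.getD_eq_getElem t 0 (by omega)]

theorem findIdx?_congr_mem {α : Type} (l : List α) (p q : α → Bool) (h : ∀ t ∈ l, p t = q t) :
    l.findIdx? p = l.findIdx? q := by
  induction l with
  | nil => rfl
  | cons a l ih =>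
    rw [List.findIdx?_cons, List.findIdx?_cons, h a (by simp),
      ih (fun t ht => h t (by simp [ht]))]

theorem hits_nil_iff {α κ : Type} (K : List κ) (P : α → κ → Bool) (tl : List α) :
    (K.filterMap (fun k => (tl.findIdx? (fun t => P t k)).map (fun j : Nat => (j : Int))) = []) ↔
      tl.findIdx? (fun t => K.any (fun k => P t k)) = none := by
  rw [List.filterMap_eq_nil_iff, List.findIdx?_eq_none_iff]
  constructor
  · intro h t ht
    rw [List.any_eq_false]
    intro k hk
    have := h k hk
    rw [Option.map_eq_none_iff, List.findIdx?_eq_none_iff] at this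
    simp [this t ht]
  · intro h k hk
    rw [Option.map_eq_none_iff, List.findIdx?_eq_none_iff]
    intro t ht
    have := h t ht
    rw [List.any_eq_false] at this
    simpa using this k hk

theorem fnti_M (v : Int) (hv : v ≠ 0) (ct : List Int) : ∀ u : List Int, u.length = ct.length →
    (((((List.zipWith (fun a b => a - b) ct u).count 0 : Int) = (ct.length : Int) - 1) ∧
      (((List.zipWith (fun a b => a - b) ct u).count v : Int) = 1)) ↔
     ∃ d, d < ct.length ∧ u = ct.set d (ct.getD d 0 - v)) := by
  induction ct with
  | nil =>
    intro u hu; simp at hu; subst hu; simp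
  | cons a ct' ih =>
    intro u hu
    cases u with
    | nil => simp at hu
    | cons b u' =>
      have hn : u'.length = ct'.length := by simpa using hu
      have hih := ih u' hn
      have hZ := fnti_Z ct' u' hn
      have hRHS : (∃ d, d < (a :: ct').length ∧ (b :: u') = (a :: ct').set d ((a :: ct').getD d 0 - v)) ↔
          ((b = a - v ∧ u' = ct') ∨ (b = a ∧ ∃ j, j < ct'.length ∧ u' = ct'.set j (ct'.getD j 0 - v))) := by
        constructor
        · rintro ⟨d, hd, heq⟩
          cases d with
          | zero => simp at heq; exact Or.inl ⟨heq.1, heq.2⟩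
          | succ j =>
            simp at heq hd
            exact Or.inr ⟨heq.1, j, by omega, heq.2⟩
        · rintro (⟨h1, h2⟩ | ⟨h1, j, hj, h2⟩)
          · exact ⟨0, by simp, by simp [h1, h2]⟩
          · exact ⟨j + 1, by simp; omega, by simp [h1, h2]⟩
      rw [hRHS]
      simp only [List.zipWith_cons_cons, List.count_cons, beq_iff_eq, List.length_cons]
      by_cases hb0 : a - b = 0
      · have hbv : ¬ (a - b = v) := fun h => hv (by omega)
        rw [if_pos hb0, if_neg hbv, add_zero]
        constructor
        · rintro ⟨h1, h2⟩
          refine Or.inr ⟨by omega, hih.mp ⟨?_, h2⟩⟩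
          push_cast at h1 ⊢; omega
        · rintro (⟨h1, h2⟩ | ⟨hba, hex⟩)
          · exfalso; omega
          · obtain ⟨hc0, hcv⟩ := hih.mpr hex
            refine ⟨?_, hcv⟩
            push_cast at hc0 ⊢; omega
      · by_cases hbv : a - b = v
        · rw [if_neg hb0, if_pos hbv, add_zero]
          constructor
          · rintro ⟨h1, h2⟩
            have hc0 : (List.zipWith (fun a b => a - b) ct' u').count 0 = ct'.length := by
              push_cast at h1; omega
            exact Or.inl ⟨by omega, (hZ.mp hc0).symm⟩
          · rintro (⟨h1, h2⟩ | ⟨hba, _⟩)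
            · subst h2
              rw [zipWith_sub_self]
              refine ⟨by simp, by simp [List.count_replicate, Ne.symm hv]⟩
            · exfalso; omega
        · rw [if_neg hb0, if_neg hbv, add_zero, add_zero]
          constructor
          · rintro ⟨h1, h2⟩
            exfalso
            have hc0 : (List.zipWith (fun a b => a - b) ct' u').count 0 = ct'.length := by
              push_cast at h1; omega
            rw [show u' = ct' from (hZ.mp hc0).symm, zipWith_sub_self] at h2
            simp [List.count_replicate, Ne.symm hv] at h2
          · rintro (⟨h1, _⟩ | ⟨hba, _⟩) <;> exfalso <;> omega

theorem fnti_N (ct : List Int) : ∀ u : List Int, u.length = ct.length →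
    (((((List.zipWith (fun a b => a - b) ct u).count 0 : Int) = (ct.length : Int) - 2) ∧
      (((List.zipWith (fun a b => a - b) ct u).count 1 : Int) = 1) ∧
      (((List.zipWith (fun a b => a - b) ct u).count (-1) : Int) = 1)) ↔
     ∃ d, d < ct.length ∧ ∃ e, e < ct.length ∧ d ≠ e ∧
       u = (ct.set d (ct.getD d 0 - 1)).set e (ct.getD e 0 + 1)) := by
  induction ct with
  | nil =>
    intro u hu; simp at hu; subst hu; simp
  | cons a ct' ih =>
    intro u hu
    cases u with
    | nil => simp at hu
    | cons b u' =>
      have hn : u'.length = ct'.length := by simpa using hu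
      have hih := ih u' hn
      have hrl : (List.zipWith (fun a b : Int => a - b) ct' u').length = ct'.length := by
        simp [List.length_zipWith]; omega
      have h3 := count3_le 0 1 (-1) (by decide) (by decide) (by decide)
        (List.zipWith (fun a b => a - b) ct' u')
      rw [hrl] at h3
      have hM1 := fnti_M 1 (by decide) ct' u' hn
      have hMm1 := fnti_M (-1) (by decide) ct' u' hn
      simp only [sub_neg_eq_add] at hMm1
      have hRHS : (∃ d, d < (a :: ct').length ∧ ∃ e, e < (a :: ct').length ∧ d ≠ e ∧
          (b :: u') = ((a :: ct').set d ((a :: ct').getD d 0 - 1)).set e ((a :: ct').getD e 0 + 1)) ↔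
          ((b = a - 1 ∧ ∃ j, j < ct'.length ∧ u' = ct'.set j (ct'.getD j 0 + 1)) ∨
           (b = a + 1 ∧ ∃ j, j < ct'.length ∧ u' = ct'.set j (ct'.getD j 0 - 1)) ∨
           (b = a ∧ ∃ i, i < ct'.length ∧ ∃ j, j < ct'.length ∧ i ≠ j ∧
             u' = (ct'.set i (ct'.getD i 0 - 1)).set j (ct'.getD j 0 + 1))) := by
        constructor
        · rintro ⟨d, hd, e, he, hde, heq⟩
          cases d with
          | zero =>
            cases e with
            | zero => exact absurd rfl hde
            | succ j =>
              simp at heq he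
              exact Or.inl ⟨heq.1, j, by omega, heq.2⟩
          | succ i =>
            cases e with
            | zero =>
              simp at heq hd
              exact Or.inr (Or.inl ⟨heq.1, i, by omega, heq.2⟩)
            | succ j =>
              simp at heq hd he
              exact Or.inr (Or.inr ⟨heq.1, i, by omega, j, by omega, by omega, heq.2⟩)
        · rintro (⟨h1, j, hj, h2⟩ | ⟨h1, j, hj, h2⟩ | ⟨h1, i, hi, j, hj, hij, h2⟩)
          · exact ⟨0, by simp, j + 1, by simp; omega, by omega, by simp [h1, h2]⟩
          · exact ⟨j + 1, by simp; omega, 0, by simp, by omega, by simp [h1, h2]⟩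
          · exact ⟨i + 1, by simp; omega, j + 1, by simp; omega, by omega, by simp [h1, h2]⟩
      rw [hRHS]
      simp only [List.zipWith_cons_cons, List.count_cons, beq_iff_eq, List.length_cons]
      by_cases hb0 : a - b = 0
      · have e1 : ¬ (a - b = 1) := by omega
        have e2 : ¬ (a - b = -1) := by omega
        rw [if_pos hb0, if_neg e1, if_neg e2, add_zero, add_zero]
        constructor
        · rintro ⟨h1, h2, h3'⟩
          refine Or.inr (Or.inr ⟨by omega, hih.mp ⟨?_, h2, h3'⟩⟩)
          push_cast at h1 ⊢; omega
        · rintro (⟨h1, _⟩ | ⟨h1, _⟩ | ⟨hba, hex⟩)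
          · exfalso; omega
          · exfalso; omega
          · obtain ⟨hc0, hc1, hcm⟩ := hih.mpr hex
            refine ⟨?_, hc1, hcm⟩
            push_cast at hc0 ⊢; omega
      · by_cases hb1 : a - b = 1
        · have e0 : ¬ (a - b = 0) := hb0
          have e2 : ¬ (a - b = -1) := by omega
          rw [if_neg e0, if_pos hb1, if_neg e2, add_zero, add_zero]
          constructor
          · rintro ⟨h1, h2, h3'⟩
            refine Or.inl ⟨by omega, hMm1.mp ⟨?_, h3'⟩⟩
            push_cast at h1 ⊢; omega
          · rintro (⟨h1, hex⟩ | ⟨h1, _⟩ | ⟨hba, _⟩)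
            · obtain ⟨hc0, hcm⟩ := hMm1.mpr hex
              have hc1 : (List.zipWith (fun a b : Int => a - b) ct' u').count 1 = 0 := by
                omega
              refine ⟨?_, ?_, hcm⟩
              · push_cast at hc0 ⊢; omega
              · push_cast [hc1]
            · exfalso; omega
            · exfalso; omega
        · by_cases hb2 : a - b = -1
          · rw [if_neg hb0, if_neg hb1, if_pos hb2, add_zero, add_zero]
            constructor
            · rintro ⟨h1, h2, h3'⟩
              refine Or.inr (Or.inl ⟨by omega, hM1.mp ⟨?_, h2⟩⟩)
              push_cast at h1 ⊢; omega
            · rintro (⟨h1, _⟩ | ⟨h1, hex⟩ | ⟨hba, _⟩)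
              · exfalso; omega
              · obtain ⟨hc0, hc1⟩ := hM1.mpr hex
                have hcm : (List.zipWith (fun a b : Int => a - b) ct' u').count (-1) = 0 := by
                  omega
                refine ⟨?_, hc1, ?_⟩
                · push_cast at hc0 ⊢; omega
                · push_cast [hcm]
              · exfalso; omega
          · rw [if_neg hb0, if_neg hb1, if_neg hb2, add_zero, add_zero, add_zero]
            constructor
            · rintro ⟨h1, h2, h3'⟩
              exfalso
              push_cast at h1 h2 h3'
              omega
            · rintro (⟨h1, _⟩ | ⟨h1, _⟩ | ⟨hba, _⟩) <;> exfalso <;> omega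

theorem fnti_build_get (dim : Nat) (l : List (List Int)) :
    ∀ (i : Int) (dct : PySem.Dict (List Int) Int) (k : List Int),
      (fnti_build dim l i dct).get? k =
        (dct.get? k).or ((l.findIdx? (fun t => fnti_key dim t == k)).map (fun j : Nat => i + (j : Int))) := by
  induction l with
  | nil => intro i dct k; simp [fnti_build]
  | cons cand rest ih =>
    intro i dct k
    rw [fnti_build, List.findIdx?_cons]
    by_cases hc : dct.contains (fnti_key dim cand)
    · rw [if_pos hc, ih]
      by_cases hk : fnti_key dim cand = k
      · rw [if_pos (show (fnti_key dim cand == k) = true by simp [hk])]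
        have : (dct.get? k).isSome := by
          rw [hk, PySem.Dict.contains_eq_isSome_get?] at hc
          exact hc
        obtain ⟨v, hv⟩ := Option.isSome_iff_exists.mp this
        simp [hv]
      · rw [if_neg (show ¬ ((fnti_key dim cand == k) = true) by simp [hk])]
        cases rest.findIdx? (fun t => fnti_key dim t == k) <;> (simp; try ring_nf)
    · rw [if_neg hc, ih]
      by_cases hk : fnti_key dim cand = k
      · rw [if_pos (show (fnti_key dim cand == k) = true by simp [hk])]
        have h0 : dct.get? k = none := by
          rw [← hk]
          rw [PySem.Dict.contains_eq_isSome_get?] at hc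
          simpa using hc
        have h1 : (dct.insert (fnti_key dim cand) i).get? k = some i := by
          rw [← hk]; exact PySem.Dict.get?_insert_self dct (fnti_key dim cand) i
        simp [h0, h1]
      · rw [if_neg (show ¬ ((fnti_key dim cand == k) = true) by simp [hk])]
        rw [show (dct.insert (fnti_key dim cand) i).get? k = dct.get? k from
          PySem.Dict.get?_insert_of_ne dct i (fun h => hk h.symm)]
        cases rest.findIdx? (fun t => fnti_key dim t == k) <;> (simp; try ring_nf)

theorem hits_min {α κ : Type} (K : List κ) (P : α → κ → Bool) (tl : List α) (j : Nat)
    (hj : tl.findIdx? (fun t => K.any (fun k => P t k)) = some j) :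
    PySem.List.min? (K.filterMap (fun k => (tl.findIdx? (fun t => P t k)).map (fun j : Nat => (j : Int))))
      (fun x => x) = some (j : Int) := by
  set hits := K.filterMap (fun k => (tl.findIdx? (fun t => P t k)).map (fun j : Nat => (j : Int))) with hhits
  obtain ⟨hjlen, hpj, hmin⟩ := List.findIdx?_eq_some_iff_getElem.mp hj
  obtain ⟨k0, hk0K, hk0⟩ := List.any_eq_true.mp hpj
  have hfk0 : tl.findIdx? (fun t => P t k0) = some j := by
    rw [List.findIdx?_eq_some_iff_getElem]
    exact ⟨hjlen, hk0, fun i hi hPi =>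
      hmin i hi (List.any_eq_true.mpr ⟨k0, hk0K, hPi⟩)⟩
  have hjmem : ((j : Nat) : Int) ∈ hits := List.mem_filterMap.mpr ⟨k0, hk0K, by rw [hfk0]; rfl⟩
  have hlb : ∀ y ∈ hits, ((j : Nat) : Int) ≤ y := by
    intro y hy
    obtain ⟨k, hkK, hk⟩ := List.mem_filterMap.mp hy
    obtain ⟨m, hm, hmy⟩ := Option.map_eq_some_iff.mp hk
    obtain ⟨hmlen, hPm, _⟩ := List.findIdx?_eq_some_iff_getElem.mp hm
    have hjm : j ≤ m := by
      by_contra hlt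
      exact hmin m (by omega) (List.any_eq_true.mpr ⟨k, hkK, hPm⟩)
    rw [← hmy]
    exact_mod_cast hjm
  cases hm? : PySem.List.min? hits (fun x => x) with
  | none =>
    rw [PySem.List.min?_eq_none_iff] at hm?
    rw [hm?] at hjmem
    simp at hjmem
  | some m =>
    have hm2 := PySem.List.min?_isMin hm? _ hjmem
    have hm3 := hlb m (PySem.List.min?_mem hm?)
    rw [le_antisymm hm2 hm3]

theorem fnti_key_eq (dim : Nat) (t : List Int) : fnti_key dim t = t.take dim := by
  simp [fnti_key, PySem.List.slice_to_natCast]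

theorem any_dkey_eq (ct t : List Int) (h : ct.length ≤ t.length) :
    (List.range ct.length).any (fun d => fnti_key ct.length t == fnti_dkey ct d) = pvDirect ct t := by
  have htk : (t.take ct.length).length = ct.length := by simp; omega
  have hM := fnti_M 1 (by decide) ct (t.take ct.length) htk
  rw [Bool.eq_iff_iff, List.any_eq_true]
  simp only [fnti_key_eq, beq_iff_eq, List.mem_range, pvDirect, Bool.and_eq_true, beq_iff_eq,
    fnti_dkey, pvDiffRow_eq_zipWith ct t h]
  constructor
  · rintro ⟨d, hd, heq⟩
    exact hM.mpr ⟨d, hd, heq⟩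
  · intro hc
    obtain ⟨d, hd, heq⟩ := hM.mp hc
    exact ⟨d, hd, heq⟩

theorem any_nkey_eq (ct t : List Int) (h : ct.length ≤ t.length) :
    (((List.range ct.length).flatMap (fun d => (List.range ct.length).map (fun e => (d, e)))).any
      (fun p => decide (p.1 ≠ p.2) && (fnti_key ct.length t == fnti_nkey ct p.1 p.2))) = pvNeigh ct t := by
  have htk : (t.take ct.length).length = ct.length := by simp; omega
  have hN := fnti_N ct (t.take ct.length) htk
  rw [Bool.eq_iff_iff, List.any_eq_true]
  simp only [fnti_key_eq, Bool.and_eq_true, beq_iff_eq, decide_eq_true_eq, List.mem_flatMap,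
    List.mem_map, List.mem_range, pvNeigh, fnti_nkey, pvDiffRow_eq_zipWith ct t h]
  constructor
  · rintro ⟨p, ⟨d, hd, e, he, hpe⟩, hne, heq⟩
    subst hpe
    exact and_assoc.mpr (hN.mpr ⟨d, hd, e, he, hne, heq⟩)
  · intro hc
    obtain ⟨d, hd, e, he, hne, heq⟩ := hN.mp (and_assoc.mp hc)
    exact ⟨(d, e), ⟨d, hd, e, he, rfl⟩, hne, heq⟩

theorem b_char (ct : List Int) (tl : List (List Int)) (hlen : ∀ t ∈ tl, ct.length ≤ t.length) :
    find_next_tuples_index_alt ct tl =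
      match tl.findIdx? (pvDirect ct) with
      | some j => (j : Int)
      | none => (match tl.findIdx? (pvNeigh ct) with
                 | some j => (j : Int)
                 | none => 0) := by
  have hget : ∀ k, (fnti_build ct.length tl 0 PySem.Dict.empty).get? k =
      (tl.findIdx? (fun t => fnti_key ct.length t == k)).map (fun j : Nat => (j : Int)) := by
    intro k
    rw [fnti_build_get, PySem.Dict.get?_empty, Option.none_or]
    cases tl.findIdx? (fun t => fnti_key ct.length t == k) <;> simp
  have hFd : tl.findIdx? (fun t => (List.range ct.length).any
      (fun d => fnti_key ct.length t == fnti_dkey ct d)) = tl.findIdx? (pvDirect ct) :=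
    findIdx?_congr_mem _ _ _ (fun t ht => any_dkey_eq ct t (hlen t ht))
  have hFn : tl.findIdx? (fun t => (((List.range ct.length).flatMap
      (fun d => (List.range ct.length).map (fun e => (d, e)))).any
      (fun p => decide (p.1 ≠ p.2) && (fnti_key ct.length t == fnti_nkey ct p.1 p.2)))) =
      tl.findIdx? (pvNeigh ct) :=
    findIdx?_congr_mem _ _ _ (fun t ht => any_nkey_eq ct t (hlen t ht))
  have hstep : ∀ d e : Nat,
      (if d ≠ e then (tl.findIdx? (fun t => fnti_key ct.length t == fnti_nkey ct d e)).map
          (fun j : Nat => (j : Int)) else none)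
        = (tl.findIdx? (fun t => decide (d ≠ e) && (fnti_key ct.length t == fnti_nkey ct d e))).map
            (fun j : Nat => (j : Int)) := by
    intro d e
    by_cases hde : d = e
    · simp [hde]
    · simp [hde]
  have hflat : (List.range ct.length).flatMap (fun d => (List.range ct.length).filterMap (fun e =>
        (tl.findIdx? (fun t => decide (d ≠ e) && (fnti_key ct.length t == fnti_nkey ct d e))).map
          (fun j : Nat => (j : Int))))
      = ((List.range ct.length).flatMap (fun d => (List.range ct.length).map (fun e => (d, e)))).filterMap
          (fun p => (tl.findIdx? (fun t => decide (p.1 ≠ p.2) && (fnti_key ct.length t == fnti_nkey ct p.1 p.2))).map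
            (fun j : Nat => (j : Int))) := by
    rw [List.filterMap_flatMap]
    congr 1
    funext d
    rw [List.filterMap_map]
    rfl
  unfold find_next_tuples_index_alt
  simp only [hget, hstep]
  rw [hflat]
  cases hfd : tl.findIdx? (pvDirect ct) with
  | some j =>
    have hmin := hits_min (List.range ct.length)
      (fun t d => fnti_key ct.length t == fnti_dkey ct d) tl j (by rw [hFd, hfd])
    have hne : (List.range ct.length).filterMap (fun d =>
        (tl.findIdx? (fun t => fnti_key ct.length t == fnti_dkey ct d)).map
          (fun j : Nat => (j : Int))) ≠ [] := by
      intro h0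
      rw [h0, (PySem.List.min?_eq_none_iff ([] : List Int) (fun x => x)).mpr rfl] at hmin
      simp at hmin
    rw [if_pos hne, hmin]
    rfl
  | none =>
    have hnil := (hits_nil_iff (List.range ct.length)
      (fun t d => fnti_key ct.length t == fnti_dkey ct d) tl).mpr (by rw [hFd, hfd])
    rw [if_neg (fun hne => hne hnil)]
    cases hfn : tl.findIdx? (pvNeigh ct) with
    | some j =>
      have hmin := hits_min
        ((List.range ct.length).flatMap (fun d => (List.range ct.length).map (fun e => (d, e))))
        (fun t p => decide (p.1 ≠ p.2) && (fnti_key ct.length t == fnti_nkey ct p.1 p.2)) tl j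
        (by rw [hFn, hfn])
      have hne : (((List.range ct.length).flatMap (fun d => (List.range ct.length).map (fun e => (d, e)))).filterMap
          (fun p => (tl.findIdx? (fun t => decide (p.1 ≠ p.2) && (fnti_key ct.length t == fnti_nkey ct p.1 p.2))).map
            (fun j : Nat => (j : Int)))) ≠ [] := by
        intro h0
        rw [h0, (PySem.List.min?_eq_none_iff ([] : List Int) (fun x => x)).mpr rfl] at hmin
        simp at hmin
      rw [if_pos hne, hmin]
      rfl
    | none =>
      have hnil2 := (hits_nil_iff
        ((List.range ct.length).flatMap (fun d => (List.range ct.length).map (fun e => (d, e))))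
        (fun t p => decide (p.1 ≠ p.2) && (fnti_key ct.length t == fnti_nkey ct p.1 p.2)) tl).mpr
        (by rw [hFn, hfn])
      rw [if_neg (fun hne => hne hnil2)]

-- ===== VERDICT (by name: the statement is the Claim_ definition above) =====
theorem find_next_tuples_index_spec : Claim_equal_find_next_tuples_index := by
  intro ct tl _ hpre
  unfold Spec_find_next_tuples_index
  rw [a_char, b_char ct tl hpre.1]
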